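-- pv_equiv track=rewrite | github.com/feisuxiaozhu/linear-programming | orderedsearch.py | validateX
-- ===== SOURCE A (Python) =====
-- def validateX(x,N): #find if x is of pure form 00000001111111
--     #corner cases:
--     length = '{0:0' + str(N) + 'b}'
--     if x== length.format(0):
--         return False
--     if x == length.format(pow(2,N)-1):
--         return False
--
--     sawOne = False
--     for i in range(len(x)):
--         if x[i]== '1':
--             sawOne = True
--         if x[i]=='0' and sawOne:
--             return False
--     return True
-- ===== SOURCE B (Python) =====
-- def validateX(x, N):
--     # same corner-case guards as the original, then a position-based check:
--     # collect the indices of all '0's and all '1's and require the last '0'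
--     # to sit strictly before the first '1' (or one of the kinds to be absent)
--     length = '{0:0' + str(N) + 'b}'
--     if x == length.format(0):
--         return False
--     if x == length.format(pow(2, N) - 1):
--         return False
--     zeros = [i for i, c in enumerate(x) if c == '0']
--     ones = [i for i, c in enumerate(x) if c == '1']
--     return not zeros or not ones or zeros[-1] < ones[0]
-- ===== Notes on version B (the rewrite author's own statement) =====
-- stated objective: alternative
-- what changed: The stateful sawOne scanning loop is replaced by a position-based formulation: build the index lists of all '0's and all '1's and accept iff one list is empty or the last '0' index is strictly below the first '1' index; the two format-based corner guards are kept unchanged.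
import Mathlib
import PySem

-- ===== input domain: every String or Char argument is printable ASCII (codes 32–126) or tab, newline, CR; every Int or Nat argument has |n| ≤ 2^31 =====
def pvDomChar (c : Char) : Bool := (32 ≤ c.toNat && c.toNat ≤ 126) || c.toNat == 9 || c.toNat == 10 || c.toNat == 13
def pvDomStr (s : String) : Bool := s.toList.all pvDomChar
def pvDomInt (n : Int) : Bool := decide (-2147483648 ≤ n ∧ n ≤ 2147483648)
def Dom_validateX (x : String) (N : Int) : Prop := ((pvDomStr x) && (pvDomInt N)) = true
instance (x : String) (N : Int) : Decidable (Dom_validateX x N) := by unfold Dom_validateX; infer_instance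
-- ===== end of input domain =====

-- B keeps A's two format-based corner guards and replaces the stateful sawOne
-- scanning loop by a position-based check: collect the index lists of '0's and
-- '1's and require the last '0' index to lie strictly before the first '1'
-- index (or one list to be empty); proved equal on all inputs with 0 ≤ N
-- (A raises ValueError for N < 0).


-- ===== PORT A =====
-- ('{0:0' + str(N) + 'b}').format(v) for a nonnegative int v: the binary
-- digits of v, zero-padded to width N.  Exact for 0 ≤ N (the inputs Pre_
-- admits) and 0 ≤ v; both Pythons call this same builtin, so the two ports
-- share this helper.
def pyFmt0b (v : Int) (N : Int) : String :=
  PySem.Str.zfill (String.ofList (Nat.toDigits 2 v.toNat)) N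

-- A's for-loop over x with the sawOne flag, early return on '0' after a '1'
def scanA : List Char → Bool → Bool
  | [], _ => true
  | c :: rest, sawOne =>
    let sawOne := if c = '1' then true else sawOne
    if c = '0' ∧ sawOne then false else scanA rest sawOne

def validateX (x : String) (N : Int) : Bool :=
  if x = pyFmt0b 0 N then false
  else if x = pyFmt0b (2 ^ N.toNat - 1) N then false
  else scanA x.toList false

-- ===== PORT B =====
-- [i for i, c in enumerate(x) if c == ch]
def idxList (cs : List Char) (ch : Char) : List Int :=
  ((PySem.List.enumerate cs).filter (fun p => p.2 = ch)).map (fun p => p.1)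

-- return not zeros or not ones or zeros[-1] < ones[0]
def validateX_alt (x : String) (N : Int) : Bool :=
  if x = pyFmt0b 0 N then false
  else if x = pyFmt0b (2 ^ N.toNat - 1) N then false
  else
    let zeros := idxList x.toList '0'
    let ones := idxList x.toList '1'
    if zeros.isEmpty then true
    else if ones.isEmpty then true
    else match PySem.List.pyGet? zeros (-1), PySem.List.pyGet? ones 0 with
      | some z, some o => decide (z < o)
      | _, _ => false

-- ===== PRECONDITION & SPEC =====
-- A raises ValueError for N < 0 (str(N) puts '-' into the format spec);
-- Pre_ excludes exactly those inputs.
def Pre_validateX (x : String) (N : Int) : Prop := 0 ≤ N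
instance (x : String) (N : Int) : Decidable (Pre_validateX x N) := by unfold Pre_validateX; infer_instance
def pvWitness_validateX : String × Int := ("0011", 4)
def Spec_validateX (x : String) (N : Int) (out : Bool) : Prop := out = validateX_alt x N
instance (x : String) (N : Int) (out : Bool) : Decidable (Spec_validateX x N out) := by unfold Spec_validateX; infer_instance

-- ===== CLAIM (what is proved, stated in full; the proofs are below) =====
def Claim_equal_validateX : Prop := ∀ (x : String) (N : Int), Dom_validateX x N → Pre_validateX x N → Spec_validateX x N (validateX x N)

-- ===== LEMMAS AND PROOFS =====

-- "no '0' at a position strictly after a '1'"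
def GoodSplit (cs : List Char) : Prop :=
  ∀ i j : Nat, i < j → cs[i]? = some '1' → cs[j]? ≠ some '0'

-- scanA with the flag already set is "no '0' remains"
theorem scanA_true (cs : List Char) : scanA cs true = !decide ('0' ∈ cs) := by
  induction cs with
  | nil => simp [scanA]
  | cons c rest ih =>
    by_cases h : c = '0'
    · subst h; simp [scanA]
    · have hstep : scanA (c :: rest) true = scanA rest true := by simp [scanA, h]
      rw [hstep, ih]
      simp [List.mem_cons, show ¬ ('0':Char) = c from fun h' => h h'.symm]

theorem scanA_false_iff (cs : List Char) : scanA cs false = true ↔ GoodSplit cs := by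
  induction cs with
  | nil =>
    simp only [scanA, true_iff]
    intro i j _ h
    simp at h
  | cons c rest ih =>
    by_cases h1 : c = '1'
    · subst h1
      have hstep : scanA ('1' :: rest) false = scanA rest true := by simp [scanA]
      rw [hstep, scanA_true]
      simp only [Bool.not_eq_true', decide_eq_false_iff_not]
      constructor
      · intro h i j hij hi hj
        cases j with
        | zero => omega
        | succ j =>
          rw [List.getElem?_cons_succ] at hj
          exact h (List.mem_of_getElem? hj)
      · intro h hmem
        obtain ⟨j, hj⟩ := List.getElem?_of_mem hmem
        exact h 0 (j + 1) (by omega) (by simp) (by simpa using hj)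
    · have hstep : scanA (c :: rest) false = scanA rest false := by
        simp [scanA, h1]
      rw [hstep, ih]
      constructor
      · intro h i j hij hi hj
        cases i with
        | zero =>
          rw [List.getElem?_cons_zero] at hi
          exact absurd (Option.some.inj hi) h1
        | succ i =>
          cases j with
          | zero => omega
          | succ j =>
            rw [List.getElem?_cons_succ] at hi hj
            exact h i j (by omega) hi hj
      · intro h i j hij hi hj
        rw [← List.getElem?_cons_succ (a := c)] at hi hj
        exact h (i + 1) (j + 1) (by omega) hi hj

theorem mem_idxList {cs : List Char} {ch : Char} {z : Int} :
    z ∈ idxList cs ch ↔ ∃ k : Nat, cs[k]? = some ch ∧ z = (k : Int) := by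
  unfold idxList
  simp only [List.mem_map, List.mem_filter, PySem.List.mem_enumerate_iff]
  constructor
  · rintro ⟨p, ⟨⟨k, hk, rfl⟩, hch⟩, rfl⟩
    simp only [decide_eq_true_eq] at hch
    exact ⟨k, by simp [List.getElem?_eq_getElem hk, hch], by simp⟩
  · rintro ⟨k, hk, rfl⟩
    have hlt : k < cs.length := (List.getElem?_eq_some_iff.mp hk).1
    have hv : cs[k] = ch := by
      have := List.getElem?_eq_getElem hlt
      rw [hk] at this
      exact (Option.some.injEq _ _ ▸ this.symm)
    exact ⟨((k : Int), ch), ⟨⟨k, hlt, by simp [hv]⟩, by simp⟩, rfl⟩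

theorem pairwise_idxList (cs : List Char) (ch : Char) :
    (idxList cs ch).Pairwise (· < ·) := by
  unfold idxList
  exact List.Pairwise.map _ (fun a b h => h)
    ((PySem.List.pairwise_lt_enumerate cs 0).filter _)

theorem head_le_of_pairwise {l : List Int} {m : Int}
    (hp : l.Pairwise (· < ·)) (hm : l.head? = some m) : ∀ a ∈ l, m ≤ a := by
  match l, hp, hm with
  | x :: t, hp, hm =>
    simp only [List.head?_cons, Option.some.injEq] at hm
    subst hm
    intro a ha
    rcases List.mem_cons.mp ha with rfl | ha'
    · omega
    · exact le_of_lt ((List.rel_of_pairwise_cons hp) ha')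

theorem le_getLast_of_pairwise {l : List Int} {m : Int}
    (hp : l.Pairwise (· < ·)) (hm : l.getLast? = some m) : ∀ a ∈ l, a ≤ m := by
  have hp' : l.reverse.Pairwise (fun a b => b < a) := List.pairwise_reverse.mpr hp
  have hm' : l.reverse.head? = some m := by rw [List.head?_reverse]; exact hm
  intro a ha
  have ha' : a ∈ l.reverse := List.mem_reverse.mpr ha
  match hr : l.reverse, hp', hm', ha' with
  | x :: t, hp', hm', ha' =>
    simp only [List.head?_cons, Option.some.injEq] at hm'
    subst hm'
    rcases List.mem_cons.mp ha' with rfl | hat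
    · omega
    · exact le_of_lt ((List.rel_of_pairwise_cons hp') hat)

theorem pyGet?_zero_head (l : List Int) : PySem.List.pyGet? l 0 = l.head? := by
  cases l <;> simp [PySem.List.pyGet?, PySem.List.pyIdx?, List.head?]

-- B's else-branch expression also decides GoodSplit
theorem altExpr_iff (cs : List Char) :
    (if (idxList cs '0').isEmpty then true
     else if (idxList cs '1').isEmpty then true
     else match PySem.List.pyGet? (idxList cs '0') (-1), PySem.List.pyGet? (idxList cs '1') 0 with
       | some z, some o => decide (z < o)
       | _, _ => false) = true ↔ GoodSplit cs := by
  by_cases hz : (idxList cs '0').isEmpty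
  · rw [if_pos hz]
    simp only [true_iff]
    intro i j _ _ hj
    have hmem : (j : Int) ∈ idxList cs '0' := mem_idxList.mpr ⟨j, hj, rfl⟩
    rw [List.isEmpty_iff.mp hz] at hmem
    simp at hmem
  · by_cases ho : (idxList cs '1').isEmpty
    · rw [if_neg hz, if_pos ho]
      simp only [true_iff]
      intro i j _ hi _
      have hmem : (i : Int) ∈ idxList cs '1' := mem_idxList.mpr ⟨i, hi, rfl⟩
      rw [List.isEmpty_iff.mp ho] at hmem
      simp at hmem
    · have hzne : idxList cs '0' ≠ [] := fun h => hz (by simp [h])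
      have hone : idxList cs '1' ≠ [] := fun h => ho (by simp [h])
      obtain ⟨zl, hzl⟩ := Option.ne_none_iff_exists'.mp (mt List.getLast?_eq_none_iff.mp hzne)
      obtain ⟨oh, hoh⟩ := Option.ne_none_iff_exists'.mp (mt List.head?_eq_none_iff.mp hone)
      rw [if_neg hz, if_neg ho, PySem.List.pyGet?_neg_one, hzl, pyGet?_zero_head, hoh]
      simp only [decide_eq_true_eq]
      constructor
      · intro hlt i j hij hi hj
        have h1 : (j : Int) ≤ zl :=
          le_getLast_of_pairwise (pairwise_idxList cs '0') hzl _ (mem_idxList.mpr ⟨j, hj, rfl⟩)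
        have h2 : oh ≤ (i : Int) :=
          head_le_of_pairwise (pairwise_idxList cs '1') hoh _ (mem_idxList.mpr ⟨i, hi, rfl⟩)
        omega
      · intro hgood
        obtain ⟨j, hj, hzl'⟩ := mem_idxList.mp (List.mem_of_getLast? hzl)
        obtain ⟨i, hi, hoh'⟩ := mem_idxList.mp (List.mem_of_mem_head? (Option.mem_def.mpr hoh))
        subst hzl'
        subst hoh'
        have hij : ¬ i < j := fun h => hgood i j h hi hj
        have hne : i ≠ j := fun h => by
          rw [h, hj] at hi
          exact absurd (Option.some.inj hi) (by decide)
        have hji : j < i := by omega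
        exact_mod_cast hji

-- ===== VERDICT (by name: the statement is the Claim_ definition above) =====
theorem validateX_spec : Claim_equal_validateX := by
  intro x N _ _
  unfold Spec_validateX validateX validateX_alt
  split_ifs
  · rfl
  · rfl
  · rw [Bool.eq_iff_iff, scanA_false_iff]
    exact (altExpr_iff x.toList).symm
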